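-- pv_equiv track=rewrite | github.com/voira/steam-game-analysis | preprocess/grouping.py | check_higher
-- ===== SOURCE A (Python) =====
-- from collections import Counter
--
-- hierarchy={"Mixed":6,
--            "Mostly Negative":3,
--            "Mostly Positive":5,
--            "Negative":2,
--            "Overwhelmingly Positive":4,
--            "Positive":8,
--            "Very Positive":7,
--            "Very Negative":1}
--
-- def check_higher(prediction_list):
--     prediction_counts = Counter(prediction_list)
--     max_count = max(prediction_counts.values())
--     most_common_predictions = [pred for pred, count in prediction_counts.items() if count == max_count]
--     if len(most_common_predictions) == 1:
--         return most_common_predictions[0]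
--     else:
--         sorted_predictions = sorted(most_common_predictions, key=lambda x: hierarchy.get(x, 0), reverse=True)
--         return sorted_predictions[0]
-- ===== SOURCE B (Python) =====
-- hierarchy={"Mixed":6,
--            "Mostly Negative":3,
--            "Mostly Positive":5,
--            "Negative":2,
--            "Overwhelmingly Positive":4,
--            "Positive":8,
--            "Very Positive":7,
--            "Very Negative":1}
--
-- def check_higher(prediction_list):
--     counts = {}
--     for p in prediction_list:
--         counts[p] = counts.get(p, 0) + 1
--     return max(counts.items(), key=lambda kv: (kv[1], hierarchy.get(kv[0], 0)))[0]
-- ===== Notes on version B (the rewrite author's own statement) =====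
-- stated objective: simpler
-- what changed: B collapses A's four-stage pipeline (max over counts, tie-filter comprehension, length-1 branch, full descending sort of the tied group) into one pass: a plain counting dict followed by a single keyed max over its items with the lexicographic key (count, hierarchy rank), relying on max returning the first maximal item which matches A's stable reverse sort.
import Mathlib
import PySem

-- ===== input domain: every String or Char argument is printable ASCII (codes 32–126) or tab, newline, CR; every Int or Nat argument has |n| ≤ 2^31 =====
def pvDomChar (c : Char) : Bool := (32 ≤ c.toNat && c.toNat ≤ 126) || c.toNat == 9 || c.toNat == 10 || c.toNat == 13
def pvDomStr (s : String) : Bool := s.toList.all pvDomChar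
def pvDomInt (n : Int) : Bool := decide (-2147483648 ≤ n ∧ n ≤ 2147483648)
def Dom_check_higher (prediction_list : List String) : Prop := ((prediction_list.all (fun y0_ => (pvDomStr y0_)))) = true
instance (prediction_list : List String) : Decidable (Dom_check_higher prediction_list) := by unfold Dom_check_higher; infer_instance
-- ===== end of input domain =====

-- B replaces A's max-count pass + tie-filter + branch + descending sort by a single keyed max
-- over the count dict's items (objective: simpler).

-- ===== PORT A =====
def hierarchy : PySem.Dict String Int :=
  PySem.Dict.ofList [("Mixed", 6), ("Mostly Negative", 3), ("Mostly Positive", 5),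
                     ("Negative", 2), ("Overwhelmingly Positive", 4), ("Positive", 8),
                     ("Very Positive", 7), ("Very Negative", 1)]

def check_higher (prediction_list : List String) : String :=
  match PySem.List.max? (PySem.Dict.counter prediction_list).values (fun y => y) with
  | none => ""  -- Python: max() raises ValueError here (empty list); excluded by Pre_
  | some max_count =>
    if ((((PySem.Dict.counter prediction_list).items.filter (fun p => p.2 == max_count)).map (fun p => p.1)).length == 1) then
      PySem.List.pyGetD (((PySem.Dict.counter prediction_list).items.filter (fun p => p.2 == max_count)).map (fun p => p.1)) 0 ""
    else
      PySem.List.pyGetD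
        (PySem.List.sorted (((PySem.Dict.counter prediction_list).items.filter (fun p => p.2 == max_count)).map (fun p => p.1))
          (fun x => hierarchy.getD x 0) true) 0 ""

-- ===== PORT B =====
def check_higher_alt (prediction_list : List String) : String :=
  -- counts: plain dict built with get-default; then one keyed max over its items; max()[0] of an
  -- empty dict raises ValueError in Python: the none case yields "" and is excluded by Pre_
  ((PySem.List.max2?
      (prediction_list.foldl (fun d p => d.insert p (d.getD p 0 + 1)) (PySem.Dict.empty : PySem.Dict String Int)).items
      (fun kv => kv.2) (fun kv => hierarchy.getD kv.1 0)).map (fun best => best.1)).getD ""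

-- ===== PRECONDITION & SPEC =====
-- Pre_ excludes exactly the empty list, on which both Pythons raise ValueError (max of an empty sequence).
def Pre_check_higher (prediction_list : List String) : Prop := prediction_list ≠ []
instance (prediction_list : List String) : Decidable (Pre_check_higher prediction_list) := by unfold Pre_check_higher; infer_instance
def pvWitness_check_higher : List String := ["Positive", "Mixed", "Mixed", "Positive"]

def Spec_check_higher (prediction_list : List String) (out : String) : Prop := out = check_higher_alt prediction_list
instance (prediction_list : List String) (out : String) : Decidable (Spec_check_higher prediction_list out) := by unfold Spec_check_higher; infer_instance

-- ===== CLAIM (what is proved, stated in full; the proofs are below) =====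
def Claim_equal_check_higher : Prop := ∀ (prediction_list : List String), Dom_check_higher prediction_list → Pre_check_higher prediction_list → Spec_check_higher prediction_list (check_higher prediction_list)

-- ===== LEMMAS AND PROOFS =====

-- proof-side abbreviations for the fold steps of B's keyed max and of A's tie-break
def pvHKey (s : String) : Int := hierarchy.getD s 0

def pvStepL (m x : String × Int) : String × Int :=
  if (decide (m.2 < x.2) || !decide (x.2 < m.2) && decide (pvHKey m.1 < pvHKey x.1)) = true then x else m

def pvStepLO (acc : Option (String × Int)) (x : String × Int) : Option (String × Int) :=
  match acc with
  | none => some x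
  | some m => if (decide (m.2 < x.2) || !decide (x.2 < m.2) && decide (pvHKey m.1 < pvHKey x.1)) = true then some x else some m

def pvStepH (m x : String) : String := if pvHKey m < pvHKey x then x else m

-- first hierarchy-argmax of a list of strings (the value A's tie branch returns)
def pvFH (f : List String) : String :=
  match f with
  | [] => ""
  | c :: r => r.foldl pvStepH c

theorem pvStepL_snd (m x : String × Int) : (pvStepL m x).2 = max m.2 x.2 := by
  unfold pvStepL
  split_ifs with hc
  · simp only [Bool.or_eq_true, Bool.and_eq_true, Bool.not_eq_true', decide_eq_true_eq,
      decide_eq_false_iff_not] at hc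
    rcases hc with h | ⟨h1, _⟩ <;> omega
  · simp only [Bool.or_eq_true, Bool.and_eq_true, Bool.not_eq_true', decide_eq_true_eq,
      decide_eq_false_iff_not, not_or, not_and] at hc
    omega

theorem pvFoldLO (t : List (String × Int)) (a : String × Int) :
    t.foldl pvStepLO (some a) = some (t.foldl pvStepL a) := by
  induction t generalizing a with
  | nil => rfl
  | cons x t ih =>
    rw [List.foldl_cons, List.foldl_cons]
    have hstep : pvStepLO (some a) x = some (pvStepL a x) := by
      simp only [pvStepLO, pvStepL]
      split_ifs <;> rfl
    rw [hstep, ih]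

-- max2? of a nonempty list is the left fold of pvStepL
theorem pvMax2_cons (a : String × Int) (t : List (String × Int)) :
    PySem.List.max2? (a :: t) (fun kv => kv.2) (fun kv => pvHKey kv.1) = some (t.foldl pvStepL a) := by
  have h0 : PySem.List.max2? (a :: t) (fun kv => kv.2) (fun kv => pvHKey kv.1)
      = (a :: t).foldl pvStepLO none := by
    unfold PySem.List.max2?
    apply PySem.List.foldl_congr_mem
    intro acc x _
    cases acc <;> rfl
  rw [h0, List.foldl_cons]
  have h1 : pvStepLO none a = some a := rfl
  rw [h1, pvFoldLO]

theorem pvHead_insertBy (before : String → String → Bool) (x y : String) (ys : List String) :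
    (PySem.List.insertBy before x (y :: ys)).headD "" = if before x y then x else y := by
  by_cases h : before x y <;> simp [PySem.List.insertBy, h]

theorem pvInsertBy_ne_nil (before : String → String → Bool) (x : String) (l : List String) :
    PySem.List.insertBy before x l ≠ [] := by
  cases l with
  | nil => simp [PySem.List.insertBy]
  | cons y ys => by_cases h : before x y <;> simp [PySem.List.insertBy, h]

-- head of the insertBy fold (= reverse-sorted list) is the running first-argmax
theorem pvSortedRev_head (r : List String) (acc : List String) (hacc : acc ≠ []) :
    (r.foldl (fun acc x => PySem.List.insertBy (fun a b => decide (pvHKey b < pvHKey a)) x acc) acc).headD ""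
      = r.foldl pvStepH (acc.headD "") := by
  induction r generalizing acc with
  | nil => rfl
  | cons x r ih =>
    cases acc with
    | nil => exact absurd rfl hacc
    | cons y ys =>
      rw [List.foldl_cons, List.foldl_cons,
        ih _ (pvInsertBy_ne_nil _ _ _), pvHead_insertBy]
      have : (if decide (pvHKey y < pvHKey x) = true then x else y) = pvStepH ((y :: ys).headD "") x := by
        unfold pvStepH
        by_cases h : pvHKey y < pvHKey x <;> simp [h]
      rw [this]

-- A's tie branch (head of the reverse-sorted tied list) is the first hierarchy-argmax
theorem pvSorted_head_eq_pvFH (f : List String) (hf : f ≠ []) :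
    PySem.List.pyGetD (PySem.List.sorted f (fun x => hierarchy.getD x 0) true) 0 "" = pvFH f := by
  cases f with
  | nil => exact absurd rfl hf
  | cons c r =>
    have h2 : ∀ (l : List String), PySem.List.pyGetD l 0 "" = l.headD "" := by
      intro l
      cases l <;> simp [PySem.List.pyGetD, PySem.List.pyGet?, PySem.List.pyIdx?]
    rw [PySem.List.sorted_rev_eq_foldl_insertBy, h2, List.foldl_cons,
      show (fun a b : String => decide (hierarchy.getD b 0 < hierarchy.getD a 0))
        = (fun a b => decide (pvHKey b < pvHKey a)) from rfl]
    have h3 : PySem.List.insertBy (fun a b => decide (pvHKey b < pvHKey a)) c ([] : List String) = [c] := rfl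
    rw [h3, pvSortedRev_head r [c] (by simp)]
    rfl

-- both branches of A's return are the first hierarchy-argmax of the tied list
theorem pvA_branch (f : List String) (hf : f ≠ []) :
    (if (f.length == 1) = true then PySem.List.pyGetD f 0 ""
     else PySem.List.pyGetD (PySem.List.sorted f (fun x => hierarchy.getD x 0) true) 0 "") = pvFH f := by
  by_cases hlen : (f.length == 1) = true
  · rw [if_pos hlen]
    cases f with
    | nil => exact absurd rfl hf
    | cons u us =>
      cases us with
      | nil => simp [PySem.List.pyGetD, PySem.List.pyGet?, PySem.List.pyIdx?, pvFH]
      | cons v vs => simp at hlen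
  · rw [if_neg hlen]
    exact pvSorted_head_eq_pvFH f hf

-- the central invariant: folding pvStepL over a::t picks, projected to fst, the first
-- hierarchy-argmax among the elements whose count equals the overall maximum M
theorem pvMain (t : List (String × Int)) (a : String × Int) (M : Int)
    (hub : ∀ p ∈ a :: t, p.2 ≤ M) (hat : ∃ p ∈ a :: t, p.2 = M) :
    (t.foldl pvStepL a).1 = pvFH (((a :: t).filter (fun p => p.2 == M)).map (fun p => p.1)) := by
  induction t generalizing a with
  | nil =>
    have ha : a.2 = M := by
      rcases hat with ⟨p, hp, hpe⟩
      rcases List.mem_cons.mp hp with h | h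
      · rw [h] at hpe; exact hpe
      · simp at h
    simp [ha, pvFH]
  | cons x t ih =>
    have hsnd := pvStepL_snd a x
    have hub' : ∀ p ∈ pvStepL a x :: t, p.2 ≤ M := by
      intro p hp
      rcases List.mem_cons.mp hp with h | h
      · rw [h]
        have h1 := hub a (by simp)
        have h2 := hub x (by simp)
        omega
      · exact hub p (by simp [h])
    have hat' : ∃ p ∈ pvStepL a x :: t, p.2 = M := by
      rcases hat with ⟨p, hp, hpe⟩
      rcases List.mem_cons.mp hp with h | h
      · refine ⟨pvStepL a x, by simp, ?_⟩
        have hx2 := hub x (by simp)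
        rw [h] at hpe
        omega
      · rcases List.mem_cons.mp h with h' | h'
        · refine ⟨pvStepL a x, by simp, ?_⟩
          have ha2 := hub a (by simp)
          rw [h'] at hpe
          omega
        · exact ⟨p, by simp [h'], hpe⟩
    have IH := ih (pvStepL a x) hub' hat'
    rw [List.foldl_cons, IH]
    have ha := hub a (by simp)
    have hx := hub x (by simp)
    by_cases haM : a.2 = M
    · by_cases hxM : x.2 = M
      · -- tie on counts: pvStepL decides by hierarchy, matching a pvStepH pre-step on the tied list
        have hs : pvStepL a x = if pvHKey a.1 < pvHKey x.1 then x else a := by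
          unfold pvStepL
          have h1 : ¬ a.2 < x.2 := by omega
          have h2 : ¬ x.2 < a.2 := by omega
          by_cases h3 : pvHKey a.1 < pvHKey x.1 <;> simp [h1, h2, h3]
        by_cases h3 : pvHKey a.1 < pvHKey x.1
        · rw [hs, if_pos h3]
          simp [haM, hxM, pvFH, pvStepH, h3]
        · rw [hs, if_neg h3]
          simp [haM, hxM, pvFH, pvStepH, h3]
      · -- x is dropped by the filter; pvStepL keeps a
        have hs : pvStepL a x = a := by
          unfold pvStepL
          have h1 : ¬ a.2 < x.2 := by omega
          have h2 : x.2 < a.2 := by omega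
          simp [h1, h2]
        rw [hs]
        simp [haM, hxM]
    · by_cases hxM : x.2 = M
      · -- a is dropped by the filter; pvStepL picks x
        have hs : pvStepL a x = x := by
          unfold pvStepL
          have h1 : a.2 < x.2 := by omega
          simp [h1]
        rw [hs]
        simp [haM, hxM]
      · -- both are dropped by the filter
        have hne : (pvStepL a x).2 ≠ M := by omega
        simp [haM, hxM, hne]

-- the fold of max over the values is an upper bound and is attained
theorem pvFoldMax_ub (t : List Int) (a : Int) : ∀ v ∈ a :: t, v ≤ t.foldl max a := by
  induction t generalizing a with
  | nil => simp
  | cons x t ih =>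
    intro v hv
    rcases List.mem_cons.mp hv with h | h
    · rw [h, List.foldl_cons]
      have := ih (max a x) (max a x) (by simp)
      omega
    · rcases List.mem_cons.mp h with h' | h'
      · rw [h', List.foldl_cons]
        have := ih (max a x) (max a x) (by simp)
        omega
      · rw [List.foldl_cons]
        exact ih (max a x) v (by simp [h'])

theorem pvFoldMax_mem (t : List Int) (a : Int) : t.foldl max a ∈ a :: t := by
  induction t generalizing a with
  | nil => simp
  | cons x t ih =>
    rw [List.foldl_cons]
    rcases List.mem_cons.mp (ih (max a x)) with h | h
    · rw [List.mem_cons, List.mem_cons, h]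
      rcases max_choice a x with h' | h' <;> simp [h']
    · exact List.mem_cons_of_mem _ (List.mem_cons_of_mem _ h)

-- ===== VERDICT (by name: the statement is the Claim_ definition above) =====
theorem check_higher_spec : Claim_equal_check_higher := by
  intro prediction_list _ hpre
  show check_higher prediction_list = check_higher_alt prediction_list
  -- the items of the counter form a nonempty list
  obtain ⟨c, r, hcr⟩ : ∃ c r, (PySem.Dict.counter prediction_list).items = c :: r := by
    cases hpl : prediction_list with
    | nil => exact absurd hpl hpre
    | cons p ps =>
      have hmem : p ∈ PySem.Set.ofList (p :: ps) := by
        rw [PySem.Set.mem_ofList]; simp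
      cases hset : (PySem.Set.ofList (p :: ps) : List String) with
      | nil => rw [hset] at hmem; simp at hmem
      | cons q qs =>
        refine ⟨(q, (((p :: ps).count q : Nat) : Int)), qs.map (fun k => (k, (((p :: ps).count k : Nat) : Int))), ?_⟩
        rw [PySem.Dict.items_counter, hset, List.map_cons]
  have hvals : (PySem.Dict.counter prediction_list).values = c.2 :: r.map (fun p => p.2) := by
    show ((PySem.Dict.counter prediction_list).items).map (fun p => p.2) = _
    rw [hcr, List.map_cons]
  set M := (r.map (fun p => p.2)).foldl max c.2 with hM
  have hub : ∀ p ∈ c :: r, p.2 ≤ M := by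
    intro p hp
    apply pvFoldMax_ub (r.map (fun p => p.2)) c.2
    rcases List.mem_cons.mp hp with h | h
    · simp [h]
    · exact List.mem_cons_of_mem _ (List.mem_map_of_mem h)
  have hat : ∃ p ∈ c :: r, p.2 = M := by
    rcases List.mem_cons.mp (pvFoldMax_mem (r.map (fun p => p.2)) c.2) with h | h
    · exact ⟨c, by simp, h.symm⟩
    · rcases List.mem_map.mp h with ⟨p, hp, hpe⟩
      exact ⟨p, by simp [hp], hpe⟩
  have hfne : (((c :: r).filter (fun p => p.2 == M)).map (fun p => p.1)) ≠ [] := by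
    rcases hat with ⟨p, hp, hpe⟩
    have hmem : p ∈ (c :: r).filter (fun p => p.2 == M) := by
      rw [List.mem_filter]
      exact ⟨hp, by simp [hpe]⟩
    intro hnil
    rw [List.map_eq_nil_iff] at hnil
    rw [hnil] at hmem
    simp at hmem
  have hmain := pvMain r c M hub hat
  calc check_higher prediction_list
      = pvFH (((c :: r).filter (fun p => p.2 == M)).map (fun p => p.1)) := by
        unfold check_higher
        rw [hvals, PySem.List.max?_id_cons, hcr]
        exact pvA_branch _ hfne
    _ = (r.foldl pvStepL c).1 := hmain.symm
    _ = check_higher_alt prediction_list := by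
        unfold check_higher_alt
        have hcr' : (prediction_list.foldl (fun d p => d.insert p (d.getD p 0 + 1))
            (PySem.Dict.empty : PySem.Dict String Int)).items = c :: r := hcr
        rw [hcr',
          show (fun kv : String × Int => hierarchy.getD kv.1 0) = (fun kv => pvHKey kv.1) from rfl,
          pvMax2_cons]
        rfl
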